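-- pv_equiv track=rewrite | github.com/solidjoker/autohome | autohome_font.py | get_total_commands
-- ===== SOURCE A (Python) =====
-- def get_total_commands(commands):
--     total_commands = []
--     command = []
--     for i in commands:
--         # 每一个命令语句
--         if i == 'Z':
--             # 以闭合路径指令Z区分不同轮廓线
--             command.append(i)
--             total_commands.append(command)
--             command = []
--         else:
--             command.append(i)
--     return total_commands
-- ===== SOURCE B (Python) =====
-- def get_total_commands(commands):
--     total_commands = []
--     rest = list(commands)
--     while 'Z' in rest:
--         i = rest.index('Z')
--         total_commands.append(rest[:i + 1])
--         rest = rest[i + 1:]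
--     return total_commands
-- ===== Notes on version B (the rewrite author's own statement) =====
-- stated objective: alternative
-- what changed: Instead of one element-wise loop carrying a current-contour accumulator, B repeatedly finds the next 'Z' with index() and splits a whole contour off by slicing, so no per-element group-building state is kept.
import Mathlib
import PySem

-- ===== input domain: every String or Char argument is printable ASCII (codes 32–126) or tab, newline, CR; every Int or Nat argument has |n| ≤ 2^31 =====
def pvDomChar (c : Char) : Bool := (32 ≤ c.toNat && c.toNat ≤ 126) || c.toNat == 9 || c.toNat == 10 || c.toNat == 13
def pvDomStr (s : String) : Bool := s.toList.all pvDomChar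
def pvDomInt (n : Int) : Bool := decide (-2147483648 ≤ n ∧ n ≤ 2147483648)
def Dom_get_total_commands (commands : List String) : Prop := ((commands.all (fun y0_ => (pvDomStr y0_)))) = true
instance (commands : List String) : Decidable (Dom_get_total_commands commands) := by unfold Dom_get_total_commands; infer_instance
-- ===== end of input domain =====

-- B replaces A's element-wise loop with a current-contour accumulator by repeated
-- index('Z')-and-slice splitting (alternative decomposition, same cost).

-- ===== PORT A =====
-- for i in commands: if i == 'Z': command.append(i); total_commands.append(command); command = [] else: command.append(i)
def get_total_commands (commands : List String) : List (List String) :=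
  (commands.foldl
    (fun (st : List (List String) × List String) i =>
      if i == "Z" then (st.1 ++ [st.2 ++ [i]], ([] : List String))
      else (st.1, st.2 ++ [i]))
    (([] : List (List String)), ([] : List String))).1

-- ===== PORT B =====
-- while 'Z' in rest: i = rest.index('Z'); total_commands.append(rest[:i+1]); rest = rest[i+1:]
def get_total_commands_altLoop (acc : List (List String)) (rest : List String) :
    List (List String) :=
  match h : PySem.List.index? rest "Z" with
  | none => acc
  | some i =>
      get_total_commands_altLoop
        (acc ++ [PySem.List.slice rest none (some ((i : Int) + 1))])
        (PySem.List.slice rest (some ((i : Int) + 1)) none)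
  termination_by rest.length
  decreasing_by
    have ⟨hk, _, _⟩ := PySem.List.getElem_of_index?_eq_some h
    have hcast : ((i : Int) + 1) = ((i + 1 : Nat) : Int) := by push_cast; ring
    rw [hcast, PySem.List.slice_from_natCast]
    simp
    omega

def get_total_commands_alt (commands : List String) : List (List String) :=
  get_total_commands_altLoop [] commands

-- ===== PRECONDITION & SPEC =====
def Spec_get_total_commands (commands : List String) (out : List (List String)) : Prop := out = get_total_commands_alt commands
instance (commands : List String) (out : List (List String)) : Decidable (Spec_get_total_commands commands out) := by unfold Spec_get_total_commands; infer_instance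

-- ===== CLAIM (what is proved, stated in full; the proofs are below) =====
def Claim_equal_get_total_commands : Prop := ∀ (commands : List String), Dom_get_total_commands commands → Spec_get_total_commands commands (get_total_commands commands)

-- ===== LEMMAS AND PROOFS =====

-- canonical grouping: contours of xs, with cmd the pending (already-read) prefix
def pvGroups (cmd : List String) : List String → List (List String)
  | [] => []
  | x :: xs => if x = "Z" then (cmd ++ [x]) :: pvGroups [] xs else pvGroups (cmd ++ [x]) xs

theorem pvGroups_no_Z (xs : List String) (cmd : List String) (h : "Z" ∉ xs) :
    pvGroups cmd xs = [] := by
  induction xs generalizing cmd with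
  | nil => rfl
  | cons x xs ih =>
      simp only [List.mem_cons, not_or] at h
      simp [pvGroups, Ne.symm h.1, ih _ h.2]

theorem pvGroups_split (pre suf : List String) (cmd : List String) (h : "Z" ∉ pre) :
    pvGroups cmd (pre ++ "Z" :: suf) = (cmd ++ pre ++ ["Z"]) :: pvGroups [] suf := by
  induction pre generalizing cmd with
  | nil => simp [pvGroups]
  | cons p ps ih =>
      simp only [List.mem_cons, not_or] at h
      simp [pvGroups, Ne.symm h.1, ih _ h.2]

theorem portA_fold (xs : List String) (tot : List (List String)) (cmd : List String) :
    (xs.foldl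
      (fun (st : List (List String) × List String) i =>
        if i == "Z" then (st.1 ++ [st.2 ++ [i]], ([] : List String))
        else (st.1, st.2 ++ [i]))
      (tot, cmd)).1 = tot ++ pvGroups cmd xs := by
  induction xs generalizing tot cmd with
  | nil => simp [pvGroups]
  | cons x xs ih =>
      simp only [List.foldl_cons]
      by_cases hx : x = "Z"
      · subst hx
        rw [if_pos (by simp), ih]
        simp [pvGroups]
      · rw [if_neg (by simp [hx]), ih]
        simp [pvGroups, hx]

theorem portB_loop_aux (n : Nat) : ∀ (rest : List String), rest.length ≤ n →
    ∀ (acc : List (List String)),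
    get_total_commands_altLoop acc rest = acc ++ pvGroups [] rest := by
  induction n with
  | zero =>
      intro rest hlen acc
      have : rest = [] := by cases rest <;> simp_all
      subst this
      rw [get_total_commands_altLoop]
      simp [pvGroups]
  | succ n ihn =>
      intro rest hlen acc
      rw [get_total_commands_altLoop]
      split
      next h =>
        rw [pvGroups_no_Z _ _ ((PySem.List.index?_eq_none_iff _ _).mp h)]
        simp
      next i h =>
      obtain ⟨pre, suf, hsplit, hleni, hpre⟩ := (PySem.List.index?_eq_some_iff _ _ _).mp h
      subst hsplit
      subst hleni
      have h1 : PySem.List.slice (pre ++ "Z" :: suf) none (some ((pre.length : Int) + 1))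
          = pre ++ ["Z"] := by
        have : ((pre.length : Int) + 1) = ((pre.length + 1 : Nat) : Int) := by push_cast; ring
        rw [this, PySem.List.slice_to_natCast, List.take_append]
        simp
      have h2 : PySem.List.slice (pre ++ "Z" :: suf) (some ((pre.length : Int) + 1)) none = suf := by
        have : ((pre.length : Int) + 1) = ((pre.length + 1 : Nat) : Int) := by push_cast; ring
        rw [this, PySem.List.slice_from_natCast, List.drop_append]
        simp
      rw [h1, h2, ihn suf (by simp at hlen ⊢; omega), pvGroups_split _ _ _ hpre]
      simp

theorem portB_loop (acc : List (List String)) (rest : List String) :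
    get_total_commands_altLoop acc rest = acc ++ pvGroups [] rest :=
  portB_loop_aux rest.length rest le_rfl acc

-- ===== VERDICT (by name: the statement is the Claim_ definition above) =====
theorem get_total_commands_spec : Claim_equal_get_total_commands := by
  intro commands _
  unfold Spec_get_total_commands get_total_commands get_total_commands_alt
  rw [portA_fold, portB_loop]
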